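-- pv_equiv track=rewrite | github.com/AdrianFernandez32/sumaBinaria | proyecto-2/funciones.py | decimal2BinarioPositive
-- ===== SOURCE A (Python) =====
-- def decimal2BinarioPositive(num):
--     num = abs(num)
--     binaryNum = []
--     pot = 15
--     while pot >= 0:
--         if num >= 2**pot:
--             binaryNum.append(1)
--             num -= 2**pot
--         else:
--             binaryNum.append(0)
--         pot -= 1
--     return binaryNum
-- ===== SOURCE B (Python) =====
-- def decimal2BinarioPositive(num):
--     n = min(abs(num), 65535)
--     return [(n // 2**bit) % 2 for bit in range(15, -1, -1)]
-- ===== Notes on version B (the rewrite author's own statement) =====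
-- stated objective: simpler
-- what changed: Replaces the greedy subtract-descending-powers loop with a clamp to 65535 followed by a per-bit closed form (n // 2**bit) % 2 over bits 15..0.
import Mathlib
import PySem

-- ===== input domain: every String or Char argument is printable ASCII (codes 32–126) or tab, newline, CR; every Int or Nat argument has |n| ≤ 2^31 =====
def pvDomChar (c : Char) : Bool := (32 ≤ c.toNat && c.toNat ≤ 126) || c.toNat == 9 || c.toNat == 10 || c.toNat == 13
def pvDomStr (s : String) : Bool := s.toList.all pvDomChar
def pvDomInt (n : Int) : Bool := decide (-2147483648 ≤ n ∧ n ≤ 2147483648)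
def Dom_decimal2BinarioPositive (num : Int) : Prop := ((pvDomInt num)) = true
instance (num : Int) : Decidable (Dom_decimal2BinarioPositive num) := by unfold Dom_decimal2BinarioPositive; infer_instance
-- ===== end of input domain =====

-- B replaces A's greedy subtract-descending-powers loop by a clamp to 65535 plus a
-- per-bit closed form (n // 2**bit) % 2 over bits 15..0 (objective: simpler).

-- B replaces A's greedy subtract-descending-powers loop with a clamp to 65535 plus a
-- per-bit closed form (n // 2**bit) % 2 over bits 15..0 (objective: simpler).

-- ===== PORT A =====
-- the while loop: fuel k+1 means pot = k, so the loop body runs for pot = 15,14,…,0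
def pvLoopA (num : Int) : Nat → List Int
  | 0 => []
  | k + 1 => if num ≥ 2 ^ k then 1 :: pvLoopA (num - 2 ^ k) k else 0 :: pvLoopA num k

def decimal2BinarioPositive (num : Int) : List Int := pvLoopA |num| 16

-- ===== PORT B =====
-- `bit` ranges over 15..0, all nonnegative, so `bit.toNat` is the exact Python exponent in 2**bit
def decimal2BinarioPositive_alt (num : Int) : List Int :=
  let n := min |num| 65535
  (PySem.List.pyRange 15 (-1) (-1)).map
    (fun bit => PySem.Int.mod (PySem.Int.floordiv n (2 ^ bit.toNat)) 2)

-- ===== PRECONDITION & SPEC =====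
def Spec_decimal2BinarioPositive (num : Int) (out : List Int) : Prop := out = decimal2BinarioPositive_alt num
instance (num : Int) (out : List Int) : Decidable (Spec_decimal2BinarioPositive num out) := by unfold Spec_decimal2BinarioPositive; infer_instance

-- ===== CLAIM (what is proved, stated in full; the proofs are below) =====
def Claim_equal_decimal2BinarioPositive : Prop := ∀ (num : Int), Dom_decimal2BinarioPositive num → Spec_decimal2BinarioPositive num (decimal2BinarioPositive num)

-- ===== LEMMAS AND PROOFS =====

lemma pv_bit_add_pow (m : Int) (k j : Nat) (hj : j < k) :
    (m + 2 ^ k) / 2 ^ j % 2 = m / 2 ^ j % 2 := by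
  have hsplit : (2 : Int) ^ k = 2 * 2 ^ (k - j - 1) * 2 ^ j := by
    calc (2 : Int) ^ k = 2 ^ (k - j - 1 + 1 + j) := by rw [show k - j - 1 + 1 + j = k by omega]
      _ = 2 * 2 ^ (k - j - 1) * 2 ^ j := by rw [pow_add, pow_succ]; ring
  rw [hsplit, Int.add_mul_ediv_right _ _ (by positivity : (2 : Int) ^ j ≠ 0),
    Int.add_mul_emod_self_left]

lemma pvLoopA_eq (k : Nat) : ∀ n : Int, 0 ≤ n →
    pvLoopA n k = (List.range k).map (fun i => min n (2 ^ k - 1) / 2 ^ (k - 1 - i) % 2) := by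
  induction k with
  | zero => intro n _; rfl
  | succ k ih =>
    intro n hn
    have hp : (0 : Int) < 2 ^ k := by positivity
    have hpow : (2 : Int) ^ (k + 1) = 2 * 2 ^ k := by rw [pow_succ]; ring
    rw [List.range_succ_eq_map, List.map_cons, List.map_map]
    by_cases h : 2 ^ k ≤ n
    · have hmin : min n (2 ^ (k + 1) - 1) = min (n - 2 ^ k) (2 ^ k - 1) + 2 ^ k := by
        rw [hpow]; omega
      have hm0 : 0 ≤ min (n - 2 ^ k) (2 ^ k - 1) := by omega
      have hm1 : min (n - 2 ^ k) (2 ^ k - 1) < 2 ^ k := by omega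
      simp only [pvLoopA, if_pos (show n ≥ 2 ^ k from h)]
      rw [ih (n - 2 ^ k) (by omega)]
      refine List.cons_eq_cons.mpr ⟨?_, ?_⟩
      · simp only [Nat.add_sub_cancel, Nat.sub_zero, hmin]
        rw [show min (n - 2 ^ k) (2 ^ k - 1) + 2 ^ k
              = min (n - 2 ^ k) (2 ^ k - 1) + 1 * 2 ^ k by ring,
          Int.add_mul_ediv_right _ 1 (by omega : (2 : Int) ^ k ≠ 0),
          Int.ediv_eq_zero_of_lt hm0 hm1]; decide
      · refine List.map_congr_left (fun i hi => ?_)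
        have hik : i < k := List.mem_range.mp hi
        simp only [Function.comp]
        rw [show k + 1 - 1 - (i + 1) = k - 1 - i by omega, hmin,
          pv_bit_add_pow _ k (k - 1 - i) (by omega)]
    · have hmin : min n (2 ^ (k + 1) - 1) = n := by rw [hpow]; omega
      have hmin' : min n (2 ^ k - 1) = n := by omega
      simp only [pvLoopA, if_neg (show ¬ n ≥ 2 ^ k from h)]
      rw [ih n hn]
      refine List.cons_eq_cons.mpr ⟨?_, ?_⟩
      · simp only [Nat.add_sub_cancel, Nat.sub_zero, hmin]
        rw [Int.ediv_eq_zero_of_lt hn (by omega)]; decide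
      · refine List.map_congr_left (fun i hi => ?_)
        simp only [Function.comp]
        rw [show k + 1 - 1 - (i + 1) = k - 1 - i by omega, hmin, hmin']

lemma pv_bitB (n : Int) (j : Nat) :
    PySem.Int.mod (PySem.Int.floordiv n (2 ^ j)) 2 = n / 2 ^ j % 2 := by
  rw [PySem.Int.floordiv_eq_ediv_of_pos (by positivity),
    PySem.Int.mod_eq_emod_of_pos (by norm_num)]

-- ===== VERDICT (by name: the statement is the Claim_ definition above) =====
theorem decimal2BinarioPositive_spec : Claim_equal_decimal2BinarioPositive := by
  intro num _
  unfold Spec_decimal2BinarioPositive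
  unfold decimal2BinarioPositive decimal2BinarioPositive_alt
  rw [pvLoopA_eq 16 |num| (abs_nonneg num),
    show PySem.List.pyRange 15 (-1) (-1) = [15,14,13,12,11,10,9,8,7,6,5,4,3,2,1,0] from by decide,
    show List.range 16 = [0,1,2,3,4,5,6,7,8,9,10,11,12,13,14,15] from rfl]
  norm_num [pv_bitB, show Int.toNat 0 = 0 from rfl, show Int.toNat 1 = 1 from rfl, show Int.toNat 2 = 2 from rfl, show Int.toNat 3 = 3 from rfl, show Int.toNat 4 = 4 from rfl, show Int.toNat 5 = 5 from rfl, show Int.toNat 6 = 6 from rfl, show Int.toNat 7 = 7 from rfl, show Int.toNat 8 = 8 from rfl, show Int.toNat 9 = 9 from rfl, show Int.toNat 10 = 10 from rfl, show Int.toNat 11 = 11 from rfl, show Int.toNat 12 = 12 from rfl, show Int.toNat 13 = 13 from rfl, show Int.toNat 14 = 14 from rfl, show Int.toNat 15 = 15 from rfl]
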